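-- pv_equiv track=rewrite | github.com/charlesgre/lpg-dashboard | tab_imports_exports_stocks.py | _order_series
-- ===== SOURCE A (Python) =====
-- from typing import Iterable, List
--
-- def _order_series(names: Iterable[str]) -> List[str]:
--     """Ordre logique des séries."""
--     key_words = [
--         "inventory", "inventor", "stock",
--         "imports", "exports",
--         "consumption", "domestic sales", "sales",
--         "production", "refinery", "blending",
--     ]
--
--     def key(s: str):
--         s_low = s.lower()
--         for i, kw in enumerate(key_words):
--             if kw in s_low:
--                 return (i, s)
--         return (len(key_words), s)
--
--     return sorted(names, key=key)
-- ===== SOURCE B (Python) =====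
-- from typing import Iterable, List
--
--
-- def _order_series(names: Iterable[str]) -> List[str]:
--     """Ordre logique des séries (partition into priority buckets, then sort each)."""
--     key_words = [
--         "inventory", "inventor", "stock",
--         "imports", "exports",
--         "consumption", "domestic sales", "sales",
--         "production", "refinery", "blending",
--     ]
--     buckets: List[List[str]] = [[] for _ in range(len(key_words) + 1)]
--     for name in names:
--         low = name.lower()
--         idx = next((i for i, kw in enumerate(key_words) if kw in low), len(key_words))
--         buckets[idx].append(name)
--     out: List[str] = []
--     for bucket in buckets:
--         out.extend(sorted(bucket))
--     return out
-- ===== Notes on version B (the rewrite author's own statement) =====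
-- stated objective: alternative
-- what changed: Replaces A's single sorted(names, key=(first-keyword-index, name)) with a one-pass partition of the names into priority buckets followed by concatenating each bucket sorted lexicographically.
import Mathlib
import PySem

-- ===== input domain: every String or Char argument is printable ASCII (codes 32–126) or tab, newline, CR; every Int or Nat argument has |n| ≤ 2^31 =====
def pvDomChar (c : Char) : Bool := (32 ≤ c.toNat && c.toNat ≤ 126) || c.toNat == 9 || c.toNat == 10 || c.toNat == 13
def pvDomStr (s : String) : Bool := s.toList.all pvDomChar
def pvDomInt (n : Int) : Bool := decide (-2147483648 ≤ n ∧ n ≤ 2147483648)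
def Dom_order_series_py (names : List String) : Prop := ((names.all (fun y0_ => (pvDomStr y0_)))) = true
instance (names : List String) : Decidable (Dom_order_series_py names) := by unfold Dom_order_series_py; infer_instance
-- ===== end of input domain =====

-- B partitions the names once into priority buckets and concatenates the lexicographically
-- sorted buckets, instead of A's single sort by a (keyword-index, name) tuple key; objective: alternative decomposition.


-- ===== PORT A =====
def pvKeyWords : List String :=
  ["inventory", "inventor", "stock",
   "imports", "exports",
   "consumption", "domestic sales", "sales",
   "production", "refinery", "blending"]

-- A's inner `key`: the enumerate-scan 'for i, kw in …: if kw in s_low: return (i, s)';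
-- returns the first matching index (kws.length on fall-through)
def pvAKeyIdx (kws : List String) (sLow : String) : Nat :=
  match kws with
  | [] => 0
  | kw :: rest => if PySem.Str.isIn kw sLow then 0 else pvAKeyIdx rest sLow + 1

def order_series_py (names : List String) : List String :=
  PySem.List.sorted2 names (fun s => pvAKeyIdx pvKeyWords (PySem.Str.lower s)) (fun s => s) false

-- ===== PORT B =====
-- B's bucket index: first keyword contained in the lowercased name (fall-through = length)
def pvBIdx (s : String) : Nat :=
  pvKeyWords.findIdx (fun kw => PySem.Str.isIn kw (PySem.Str.lower s))

def order_series_py_alt (names : List String) : List String :=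
  let buckets :=
    names.foldl (fun bs name => bs.modify (pvBIdx name) (· ++ [name]))
      (List.replicate (pvKeyWords.length + 1) [])
  buckets.foldl (fun out b => out ++ PySem.List.sorted b (fun x => x) false) []

-- ===== PRECONDITION & SPEC =====
def Spec_order_series_py (names : List String) (out : List String) : Prop := out = order_series_py_alt names
instance (names : List String) (out : List String) : Decidable (Spec_order_series_py names out) := by unfold Spec_order_series_py; infer_instance

-- ===== CLAIM (what is proved, stated in full; the proofs are below) =====
def Claim_equal_order_series_py : Prop := ∀ (names : List String), Dom_order_series_py names → Spec_order_series_py names (order_series_py names)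

-- ===== LEMMAS AND PROOFS =====

-- A's sort key, as a single lexicographically ordered value
def pvKey (s : String) : Lex (Nat × String) := toLex (pvBIdx s, s)

theorem pvKey_inj : Function.Injective pvKey := by
  intro a b h
  have h2 := congrArg (fun p => (ofLex p).2) h
  simpa [pvKey] using h2

theorem pvAKeyIdx_eq_findIdx (kws : List String) (sLow : String) :
    pvAKeyIdx kws sLow = kws.findIdx (fun kw => PySem.Str.isIn kw sLow) := by
  induction kws with
  | nil => simp [pvAKeyIdx]
  | cons kw rest ih =>
    cases h : PySem.Str.isIn kw sLow <;>
      simp [pvAKeyIdx, List.findIdx_cons, ih]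

theorem pvLexBool (i j : Nat) (a b : String) :
    (decide (i < j) || (!decide (j < i) && decide (a < b)))
      = decide ((toLex (i, a) : Lex (Nat × String)) < toLex (j, b)) := by
  rcases Nat.lt_trichotomy i j with h | h | h
  · simp [Prod.Lex.lt_iff, h]
  · subst h; simp [Prod.Lex.lt_iff]
  · simp [Prod.Lex.lt_iff, Nat.lt_asymm h, Nat.ne_of_gt h]
    exact fun hle => absurd hle (by omega)

theorem pvA_eq_sorted (names : List String) :
    order_series_py names = PySem.List.sorted names pvKey false := by
  rw [PySem.List.sorted_eq_foldl_insertBy]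
  show List.foldl (fun acc x =>
      PySem.List.insertBy (fun a b =>
        decide (pvAKeyIdx pvKeyWords (PySem.Str.lower a) < pvAKeyIdx pvKeyWords (PySem.Str.lower b)) ||
          (!decide (pvAKeyIdx pvKeyWords (PySem.Str.lower b) < pvAKeyIdx pvKeyWords (PySem.Str.lower a)) &&
            decide (a < b))) x acc) [] names = _
  have hfun : (fun (a b : String) =>
      decide (pvAKeyIdx pvKeyWords (PySem.Str.lower a) < pvAKeyIdx pvKeyWords (PySem.Str.lower b)) ||
        (!decide (pvAKeyIdx pvKeyWords (PySem.Str.lower b) < pvAKeyIdx pvKeyWords (PySem.Str.lower a)) &&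
          decide (a < b)))
      = (fun a b => decide (pvKey a < pvKey b)) := by
    funext a b
    rw [pvAKeyIdx_eq_findIdx, pvAKeyIdx_eq_findIdx, pvLexBool]
    rfl
  rw [hfun]

theorem pvBIdx_lt (s : String) : pvBIdx s < pvKeyWords.length + 1 :=
  Nat.lt_succ_of_le (List.findIdx_le_length)

-- after folding the names into the buckets, bucket j holds exactly the names with index j, in order
theorem pv_fold_modify_getElem? (f : String → Nat) (t : List String) :
    ∀ (bs : List (List String)), (∀ x, f x < bs.length) → ∀ (j : Nat),
      (t.foldl (fun bs x => bs.modify (f x) (· ++ [x])) bs)[j]? =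
        (bs[j]?).map (· ++ t.filter (fun x => decide (f x = j))) := by
  induction t with
  | nil => intro bs _ j; simp
  | cons x t ih =>
    intro bs hf j
    rw [List.foldl_cons, ih (bs.modify (f x) (· ++ [x])) (by simpa using hf) j]
    rcases Nat.lt_or_ge j bs.length with hj | hj
    · rw [List.getElem?_eq_getElem hj,
        List.getElem?_eq_getElem (by simpa using hj)]
      simp only [Option.map_some, List.getElem_modify]
      by_cases hx : f x = j <;>
        simp [hx, List.append_assoc]
    · rw [List.getElem?_eq_none (by simpa using hj), List.getElem?_eq_none hj]
      simp

theorem pv_buckets_eq (names : List String) :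
    names.foldl (fun bs x => bs.modify (pvBIdx x) (· ++ [x]))
        (List.replicate (pvKeyWords.length + 1) []) =
      (List.range (pvKeyWords.length + 1)).map
        (fun j => names.filter (fun x => decide (pvBIdx x = j))) := by
  apply List.ext_getElem?
  intro j
  rw [pv_fold_modify_getElem? pvBIdx names _ (fun x => by simpa using pvBIdx_lt x) j]
  rcases Nat.lt_or_ge j (pvKeyWords.length + 1) with hj | hj
  · rw [List.getElem?_eq_getElem (by simpa using hj),
      List.getElem?_eq_getElem (by simpa using hj)]
    simp
  · rw [List.getElem?_eq_none (by simpa using hj), List.getElem?_eq_none (by simpa using hj)]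
    simp

theorem pvB_eq_flatten (names : List String) :
    order_series_py_alt names =
      ((List.range (pvKeyWords.length + 1)).map
        (fun j => PySem.List.sorted (names.filter (fun x => decide (pvBIdx x = j))) (fun x => x) false)).flatten := by
  show (names.foldl (fun bs x => bs.modify (pvBIdx x) (· ++ [x]))
      (List.replicate (pvKeyWords.length + 1) [])).foldl
        (fun out b => out ++ PySem.List.sorted b (fun x => x) false) [] = _
  rw [pv_buckets_eq, PySem.List.foldl_append_eq_flatMap, List.flatMap_def, List.map_map]
  rfl

theorem pv_perm_partition (f : String → Nat) :
    ∀ (n : Nat) (t : List String), (∀ x ∈ t, f x < n) →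
      (((List.range n).map
        (fun j => PySem.List.sorted (t.filter (fun x => decide (f x = j))) (fun x => x) false)).flatten).Perm t := by
  intro n
  induction n with
  | zero =>
    intro t h
    match t with
    | [] => simp
    | x :: t => exact absurd (h x (by simp)) (Nat.not_lt_zero _)
  | succ n ih =>
    intro t h
    rw [List.range_succ, List.map_append, List.flatten_append]
    have hmap : ∀ j ∈ List.range n,
        t.filter (fun x => decide (f x = j)) =
          (t.filter (fun x => !decide (f x = n))).filter (fun x => decide (f x = j)) := by
      intro j hj
      have hjn : j < n := List.mem_range.mp hj
      rw [List.filter_filter]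
      apply List.filter_congr
      intro x _
      by_cases hx : f x = j <;> simp [hx] <;> omega
    have hM : (List.range n).map
        (fun j => PySem.List.sorted (t.filter (fun x => decide (f x = j))) (fun x => x) false) =
      (List.range n).map
        (fun j => PySem.List.sorted ((t.filter (fun x => !decide (f x = n))).filter
          (fun x => decide (f x = j))) (fun x => x) false) :=
      List.map_congr_left (fun j hj => by rw [hmap j hj])
    rw [hM]
    simp only [List.map_cons, List.map_nil, List.flatten_cons, List.flatten_nil, List.append_nil]
    refine ((ih (t.filter (fun x => !decide (f x = n)))
        (fun x hx => by
          have h1 := h x (List.mem_of_mem_filter hx)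
          have h2 := List.of_mem_filter hx
          simp at h2
          omega)).append
      (PySem.List.sorted_perm (t.filter (fun x => decide (f x = n))) (fun x => x) false)).trans
      (List.perm_append_comm.trans (List.filter_append_perm _ t))

theorem pv_pairwise_flatten (names : List String) :
    List.Pairwise (fun a b => pvKey a ≤ pvKey b)
      (((List.range (pvKeyWords.length + 1)).map
        (fun j => PySem.List.sorted (names.filter (fun x => decide (pvBIdx x = j))) (fun x => x) false)).flatten) := by
  rw [List.pairwise_flatten]
  constructor
  · intro l hl
    rw [List.mem_map] at hl
    obtain ⟨j, _, rfl⟩ := hl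
    have hp := PySem.List.sorted_pairwise (names.filter (fun x => decide (pvBIdx x = j))) (fun x => x)
    refine hp.imp_of_mem ?_
    intro a b ha hb hab
    have ha' : pvBIdx a = j := by
      have := (PySem.List.mem_sorted _ _ _ a).mp ha
      simpa using (List.of_mem_filter this)
    have hb' : pvBIdx b = j := by
      have := (PySem.List.mem_sorted _ _ _ b).mp hb
      simpa using (List.of_mem_filter this)
    rw [Prod.Lex.le_iff]
    right
    exact ⟨by simp [pvKey, ha', hb'], hab⟩
  · rw [List.pairwise_map]
    refine List.pairwise_lt_range.imp ?_
    intro j1 j2 hlt a ha b hb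
    have ha' : pvBIdx a = j1 := by
      have := (PySem.List.mem_sorted _ _ _ a).mp ha
      simpa using (List.of_mem_filter this)
    have hb' : pvBIdx b = j2 := by
      have := (PySem.List.mem_sorted _ _ _ b).mp hb
      simpa using (List.of_mem_filter this)
    apply le_of_lt
    rw [Prod.Lex.lt_iff]
    left
    simpa [pvKey, ha', hb'] using hlt

-- ===== VERDICT (by name: the statement is the Claim_ definition above) =====
theorem order_series_py_spec : Claim_equal_order_series_py := by
  intro names _
  unfold Spec_order_series_py
  rw [pvA_eq_sorted, pvB_eq_flatten]
  refine PySem.List.eq_of_perm_of_pairwise_le_of_injective pvKey pvKey_inj ?_ ?_ ?_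
  · exact (PySem.List.sorted_perm names pvKey false).trans
      (pv_perm_partition pvBIdx (pvKeyWords.length + 1) names (fun x _ => pvBIdx_lt x)).symm
  · exact PySem.List.sorted_pairwise names pvKey
  · exact pv_pairwise_flatten names
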